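-- pv_equiv track=rewrite | github.com/serbng/lauetools-utils | laueutils/utils/chunks.py | grid_chunks
-- ===== SOURCE A (Python) =====
-- def grid_chunks(num_rows, num_cols, chunk_size):
--     """
--     Suddivide una griglia di dimensioni num_rows x num_cols
--     in sotto-griglie (chunk) di dimensione chunk_size x chunk_size (circa).
--     Restituisce una lista di "chunk", dove ciascun chunk è
--     una lista di indici lineari (r * num_cols + c)
--     corrispondenti alle celle (r, c) del sotto-blocco.
--
--     Esempio: chunk_size=10 -> blocchi 10x10,
--     l'ultimo blocco può essere più piccolo se 81 non è un multiplo di 10.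
--     """
--     chunks = []
--     for r_start in range(0, num_rows, chunk_size):
--         r_end = min(r_start + chunk_size, num_rows)
--         for c_start in range(0, num_cols, chunk_size):
--             c_end = min(c_start + chunk_size, num_cols)
--
--             # Costruiamo la lista di indici "lineari" di questo sotto-blocco
--             subgrid_indices = []
--             for r in range(r_start, r_end):
--                 for c in range(c_start, c_end):
--                     idx = r * num_cols + c
--                     subgrid_indices.append(idx)
--
--             chunks.append(subgrid_indices)
--
--     return chunks
-- ===== SOURCE B (Python) =====
-- def grid_chunks(num_rows, num_cols, chunk_size):
--     # One flat pass over all cells in row-major order, distributing each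
--     # linear index into its block's bucket (instead of nested block loops).
--     row_blocks = len(range(0, num_rows, chunk_size))
--     col_blocks = len(range(0, num_cols, chunk_size))
--     if row_blocks == 0 or col_blocks == 0:
--         return []
--     chunks = [[] for _ in range(row_blocks * col_blocks)]
--     for r in range(num_rows):
--         for c in range(num_cols):
--             chunks[(r // chunk_size) * col_blocks + (c // chunk_size)].append(r * num_cols + c)
--     return chunks
-- ===== Notes on version B (the rewrite author's own statement) =====
-- stated objective: alternative
-- what changed: Replaces the four nested block/cell loops building each chunk separately by one flat row-major pass over all cells that distributes each linear index into its pre-allocated bucket (r//chunk_size)*col_blocks + c//chunk_size.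
import Mathlib
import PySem

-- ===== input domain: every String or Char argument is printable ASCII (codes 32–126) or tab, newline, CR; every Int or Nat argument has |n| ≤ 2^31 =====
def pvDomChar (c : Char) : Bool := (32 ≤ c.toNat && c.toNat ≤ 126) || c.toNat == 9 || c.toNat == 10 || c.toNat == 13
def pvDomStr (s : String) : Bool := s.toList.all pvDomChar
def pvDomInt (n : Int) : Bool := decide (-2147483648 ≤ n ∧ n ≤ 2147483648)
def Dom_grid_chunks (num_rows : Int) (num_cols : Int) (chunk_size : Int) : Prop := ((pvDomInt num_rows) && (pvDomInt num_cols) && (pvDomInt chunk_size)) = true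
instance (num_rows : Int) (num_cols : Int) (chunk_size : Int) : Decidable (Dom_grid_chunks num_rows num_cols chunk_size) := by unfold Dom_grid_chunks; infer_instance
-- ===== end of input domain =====

-- B replaces A's nested block/cell loops by one flat row-major pass that distributes each
-- linear index into its pre-allocated bucket (alternative decomposition, same cost).


-- ===== PORT A =====
def grid_chunks (num_rows : Int) (num_cols : Int) (chunk_size : Int) : List (List Int) :=
  (PySem.List.pyRange 0 num_rows chunk_size).foldl (fun chunks r_start =>
    let r_end := min (r_start + chunk_size) num_rows
    (PySem.List.pyRange 0 num_cols chunk_size).foldl (fun chunks c_start =>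
      let c_end := min (c_start + chunk_size) num_cols
      let subgrid_indices :=
        (PySem.List.pyRange r_start r_end 1).foldl (fun si r =>
          (PySem.List.pyRange c_start c_end 1).foldl (fun si c =>
            si ++ [r * num_cols + c]) si) []
      chunks ++ [subgrid_indices]) chunks) []


-- ===== PORT B =====
-- Python's chunks[k].append(v) is ported as set k (getD k [] ++ [v]); inside Pre_ the
-- executed index k is always in range (proved below), so this matches Python exactly.
def grid_chunks_alt (num_rows : Int) (num_cols : Int) (chunk_size : Int) : List (List Int) :=
  let row_blocks := (PySem.List.pyRange 0 num_rows chunk_size).length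
  let col_blocks := (PySem.List.pyRange 0 num_cols chunk_size).length
  if row_blocks = 0 ∨ col_blocks = 0 then []
  else
    let init := List.replicate (row_blocks * col_blocks) ([] : List Int)
    (PySem.List.pyRange 0 num_rows 1).foldl (fun chunks r =>
      (PySem.List.pyRange 0 num_cols 1).foldl (fun chunks c =>
        let k := (PySem.Int.floordiv r chunk_size * (col_blocks : Int)
                  + PySem.Int.floordiv c chunk_size).toNat
        chunks.set k (chunks.getD k [] ++ [r * num_cols + c])) chunks) init


-- ===== PRECONDITION & SPEC =====
-- Python's range(0, n, 0) raises ValueError, so both A and B raise exactly when chunk_size = 0;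
-- those inputs are excluded (A returns normally on every other input).
def Pre_grid_chunks (num_rows : Int) (num_cols : Int) (chunk_size : Int) : Prop := chunk_size ≠ 0
instance (num_rows : Int) (num_cols : Int) (chunk_size : Int) : Decidable (Pre_grid_chunks num_rows num_cols chunk_size) := by unfold Pre_grid_chunks; infer_instance
def pvWitness_grid_chunks : Int × Int × Int := (5, 7, 3)

def Spec_grid_chunks (num_rows : Int) (num_cols : Int) (chunk_size : Int) (out : List (List Int)) : Prop := out = grid_chunks_alt num_rows num_cols chunk_size
instance (num_rows : Int) (num_cols : Int) (chunk_size : Int) (out : List (List Int)) : Decidable (Spec_grid_chunks num_rows num_cols chunk_size out) := by unfold Spec_grid_chunks; infer_instance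

-- ===== CLAIM (what is proved, stated in full; the proofs are below) =====
def Claim_equal_grid_chunks : Prop := ∀ (num_rows : Int) (num_cols : Int) (chunk_size : Int), Dom_grid_chunks num_rows num_cols chunk_size → Pre_grid_chunks num_rows num_cols chunk_size → Spec_grid_chunks num_rows num_cols chunk_size (grid_chunks num_rows num_cols chunk_size)

-- ===== LEMMAS AND PROOFS =====

theorem pv_foldl_bucket {α β : Type} (idx : α → Nat) (val : α → β)
    (xs : List α) (init : List (List β)) (h : ∀ x ∈ xs, idx x < init.length) :
    xs.foldl (fun ch x => ch.set (idx x) (ch.getD (idx x) [] ++ [val x])) init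
      = (List.range init.length).map (fun k => init.getD k [] ++ (xs.filter (fun x => idx x == k)).map val) := by
  induction xs generalizing init with
  | nil =>
      simp only [List.foldl_nil, List.filter_nil, List.map_nil, List.append_nil]
      apply List.ext_getElem (by simp)
      intro i h1 h2
      simp [List.getD_eq_getElem?_getD, h1] at *
  | cons x xs ih =>
      rw [List.foldl_cons]
      rw [ih (init.set (idx x) (init.getD (idx x) [] ++ [val x]))
          (by intro y hy; rw [List.length_set]; exact h y (List.mem_cons_of_mem _ hy))]
      rw [List.length_set]
      apply List.map_congr_left
      intro k hk
      rw [List.mem_range] at hk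
      have hx : idx x < init.length := h x List.mem_cons_self
      by_cases hkx : idx x = k
      · subst hkx
        simp [List.getD_eq_getElem?_getD, List.getElem?_set, hx]
      · simp [List.getD_eq_getElem?_getD, List.getElem?_set, hkx]

theorem pv_range_mul {γ : Type} (n : Nat) (hn : 0 < n) (F : Nat → Nat → List γ) (m : Nat) :
    (List.range (m*n)).map (fun k => F (k/n) (k%n))
      = (List.range m).flatMap (fun i => (List.range n).map (fun j => F i j)) := by
  induction m with
  | zero => simp
  | succ m ih =>
      have : (m+1)*n = m*n + n := by ring
      rw [this, List.range_add, List.map_append, List.map_map, List.range_succ,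
          List.flatMap_append, ← ih]
      simp only [List.flatMap_cons, List.flatMap_nil, List.append_nil]
      congr 1
      apply List.map_congr_left
      intro j hj
      rw [List.mem_range] at hj
      have h1 : (m*n + j)/n = m := by
        rw [Nat.mul_comm m n, Nat.mul_add_div hn, Nat.div_eq_of_lt hj, Nat.add_zero]
      have h2 : (m*n + j)%n = j := by
        rw [Nat.mul_comm m n, Nat.mul_add_mod, Nat.mod_eq_of_lt hj]
      simp [h1, h2]

theorem pv_filter_pyRange (a b lo hi : Int) :
    (PySem.List.pyRange a b 1).filter (fun x => decide (lo ≤ x ∧ x < hi))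
      = PySem.List.pyRange (max a lo) (min b hi) 1 := by
  apply List.eq_of_perm_of_sorted (le := (· < · : Int → Int → Prop))
    (fun x y _ _ h1 h2 => absurd (lt_trans h1 h2) (lt_irrefl x))
    ((PySem.List.pairwise_lt_pyRange_one a b).filter _)
    (PySem.List.pairwise_lt_pyRange_one _ _)
  rw [List.perm_ext_iff_of_nodup ((PySem.List.nodup_pyRange_one a b).filter _)
      (PySem.List.nodup_pyRange_one _ _)]
  intro x
  simp [List.mem_filter, PySem.List.mem_pyRange_one]
  omega

theorem pv_euclid {cb dr dc i j : Int} (hcb : 0 < cb) (hdc0 : 0 ≤ dc) (hdc : dc < cb)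
    (hj0 : 0 ≤ j) (hj : j < cb) (h : dr*cb + dc = i*cb + j) : dr = i ∧ dc = j := by
  have h2 : (dr - i) * cb = j - dc := by ring_nf; linarith
  have hdr : dr = i := by
    rcases lt_trichotomy dr i with hlt | heq | hgt
    · have : (dr - i) * cb ≤ (-1) * cb := by
        apply mul_le_mul_of_nonneg_right (by omega) (le_of_lt hcb)
      linarith
    · exact heq
    · have : (1:Int) * cb ≤ (dr - i) * cb := by
        apply mul_le_mul_of_nonneg_right (by omega) (le_of_lt hcb)
      linarith
  subst hdr
  constructor
  · rfl
  · linarith [h2]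

theorem pv_ceil_le {R s : Int} (hs : 0 < s) : R ≤ ((R + s - 1)/s) * s := by
  have e := Int.ediv_add_emod (R+s-1) s
  have m1 := Int.emod_nonneg (R+s-1) (by omega : s ≠ 0)
  have m2 := Int.emod_lt_of_pos (R+s-1) hs
  have : ((R + s - 1)/s) * s = s * ((R + s - 1)/s) := mul_comm _ _
  linarith

theorem pv_ceil_lt {R s : Int} (hs : 0 < s) : ((R + s - 1)/s - 1) * s < R := by
  have e := Int.ediv_add_emod (R+s-1) s
  have m1 := Int.emod_nonneg (R+s-1) (by omega : s ≠ 0)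
  have : ((R + s - 1)/s - 1) * s = s * ((R + s - 1)/s) - s := by ring
  linarith

theorem pv_ceil_pos {R s : Int} (hs : 0 < s) (hR : 0 < R) : 0 < (R + s - 1)/s := by
  have h1 := pv_ceil_le (R := R) hs
  by_contra hq
  push_neg at hq
  have : ((R + s - 1)/s) * s ≤ 0 := mul_nonpos_iff.mpr (Or.inr ⟨hq, le_of_lt hs⟩)
  linarith

theorem pv_flatMap_const {γ δ : Type} (l : List γ) (n : Nat) (x : δ) :
    l.flatMap (fun _ => List.replicate n x) = List.replicate (l.length * n) x := by
  induction l with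
  | nil => simp
  | cons y l ih =>
      rw [List.flatMap_cons, ih, List.length_cons]
      rw [show (l.length + 1) * n = n + l.length * n by ring, List.replicate_add]
theorem pv_A_form (R C s : Int) :
    grid_chunks R C s = (PySem.List.pyRange 0 R s).flatMap (fun rs =>
      (PySem.List.pyRange 0 C s).map (fun cs =>
        (PySem.List.pyRange rs (min (rs+s) R) 1).flatMap (fun r =>
          (PySem.List.pyRange cs (min (cs+s) C) 1).map (fun c => r*C+c)))) := by
  simp only [grid_chunks, PySem.List.foldl_append_singleton_eq_map,
    PySem.List.foldl_append_eq_flatMap, List.nil_append]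

theorem pv_B_form (R C s : Int) (h : ¬ ((PySem.List.pyRange 0 R s).length = 0 ∨ (PySem.List.pyRange 0 C s).length = 0)) :
    grid_chunks_alt R C s =
      ((PySem.List.pyRange 0 R 1).flatMap (fun r => (PySem.List.pyRange 0 C 1).map (fun c => (r, c)))).foldl
        (fun ch p => ch.set ((PySem.Int.floordiv p.1 s * ((PySem.List.pyRange 0 C s).length : Int)
                  + PySem.Int.floordiv p.2 s).toNat)
            (ch.getD ((PySem.Int.floordiv p.1 s * ((PySem.List.pyRange 0 C s).length : Int)
                  + PySem.Int.floordiv p.2 s).toNat) [] ++ [p.1 * C + p.2]))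
        (List.replicate ((PySem.List.pyRange 0 R s).length * (PySem.List.pyRange 0 C s).length) ([] : List Int)) := by
  simp only [grid_chunks_alt, if_neg h]
  rw [List.foldl_flatMap]
  simp only [List.foldl_map]

theorem pv_cell {R C s : Int} (hs : 0 < s) (hC : 0 < C) (i j : Nat)
    (hi : (i:Int) < (R+s-1)/s) (hj : (j:Int) < (C+s-1)/s) :
    (((PySem.List.pyRange 0 R 1).flatMap (fun r => (PySem.List.pyRange 0 C 1).map (fun c => (r, c)))).filter
        (fun p => (PySem.Int.floordiv p.1 s * ((((C+s-1)/s).toNat : Nat) : Int) + PySem.Int.floordiv p.2 s).toNat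
                    == i * ((C+s-1)/s).toNat + j)).map (fun p => p.1*C+p.2)
      = (PySem.List.pyRange (s*i) (min (s*i+s) R) 1).flatMap (fun r =>
          (PySem.List.pyRange (s*j) (min (s*j+s) C) 1).map (fun c => r*C+c)) := by
  have hqC : ((((C+s-1)/s).toNat : Nat) : Int) = (C+s-1)/s :=
    Int.toNat_of_nonneg (le_of_lt (pv_ceil_pos hs hC))
  have hqCpos : (0:Int) < (C+s-1)/s := pv_ceil_pos hs hC
  have hCle := pv_ceil_le (R:=C) hs
  have hRlt := pv_ceil_lt (R:=R) hs
  have hpred : ∀ r c : Int, 0 ≤ r → 0 ≤ c → c < C →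
      ((PySem.Int.floordiv r s * ((((C+s-1)/s).toNat : Nat) : Int) + PySem.Int.floordiv c s).toNat
        == i * ((C+s-1)/s).toNat + j)
      = ((PySem.Int.floordiv r s == (i:Int)) && decide (s*(j:Int) ≤ c ∧ c < s*j+s)) := by
    intro r c hr0 hc0 hcC
    have hdr0 : 0 ≤ PySem.Int.floordiv r s := by
      rw [show (0:Int) ≤ PySem.Int.floordiv r s ↔ (0:Int)*s ≤ r from PySem.Int.le_floordiv_iff_mul_le hs]
      linarith
    have hdc0 : 0 ≤ PySem.Int.floordiv c s := by
      rw [show (0:Int) ≤ PySem.Int.floordiv c s ↔ (0:Int)*s ≤ c from PySem.Int.le_floordiv_iff_mul_le hs]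
      linarith
    have hdc : PySem.Int.floordiv c s < (C+s-1)/s := by
      rw [PySem.Int.floordiv_lt_iff_lt_mul hs]
      linarith
    rw [Bool.eq_iff_iff]
    simp only [beq_iff_eq, Bool.and_eq_true, decide_eq_true_eq]
    have hsecond : PySem.Int.floordiv c s = (j:Int) ↔ s*(j:Int) ≤ c ∧ c < s*j+s := by
      rw [PySem.Int.floordiv_eq_iff_of_pos hs]
      constructor <;> (intro h; constructor) <;> linarith [h.1, h.2]
    rw [← hsecond]
    constructor
    · intro h
      have hnn : 0 ≤ PySem.Int.floordiv r s * ((((C+s-1)/s).toNat : Nat) : Int) + PySem.Int.floordiv c s := by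
        have := mul_nonneg hdr0 (Int.natCast_nonneg ((C+s-1)/s).toNat)
        linarith
      have hInt : PySem.Int.floordiv r s * ((((C+s-1)/s).toNat : Nat) : Int) + PySem.Int.floordiv c s
          = ((i * ((C+s-1)/s).toNat + j : Nat) : Int) := by
        rw [← h, Int.toNat_of_nonneg hnn]
      rw [hqC] at hInt
      have hcast : ((i * ((C+s-1)/s).toNat + j : Nat) : Int) = (i:Int) * ((C+s-1)/s) + j := by
        push_cast [hqC]
        ring
      rw [hcast] at hInt
      exact pv_euclid hqCpos hdc0 hdc (by positivity) hj hInt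
    · rintro ⟨h1, h2⟩
      rw [h1, h2, hqC]
      have : (i:Int) * ((C+s-1)/s) + (j:Int) = ((i * ((C+s-1)/s).toNat + j : Nat) : Int) := by
        push_cast [hqC]
        ring
      rw [this, Int.toNat_natCast]
  rw [List.filter_flatMap, List.map_flatMap]
  simp only [List.filter_map, List.map_map, Function.comp_def]
  have hiR : s*(i:Int) < R := by
    have h1 : (i:Int)*s ≤ ((R+s-1)/s - 1)*s :=
      mul_le_mul_of_nonneg_right (by omega) (le_of_lt hs)
    linarith
  have h0i : (0:Int) ≤ s*(i:Int) := by positivity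
  rw [PySem.List.pyRange_one_append 0 (s*(i:Int)) R h0i (le_of_lt hiR), List.flatMap_append,
      PySem.List.pyRange_one_append (s*(i:Int)) (min (s*(i:Int)+s) R) R
        (le_min (by linarith) (le_of_lt hiR)) (min_le_right _ _), List.flatMap_append]
  have hleft : (PySem.List.pyRange 0 (s*(i:Int)) 1).flatMap
      (fun r => ((PySem.List.pyRange 0 C 1).filter
        (fun c => (PySem.Int.floordiv r s * ((((C+s-1)/s).toNat : Nat) : Int) + PySem.Int.floordiv c s).toNat
                    == i * ((C+s-1)/s).toNat + j)).map (fun c => r*C+c)) = [] := by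
    rw [List.flatMap_eq_nil_iff]
    intro r hr
    rw [PySem.List.mem_pyRange_one] at hr
    have hdrlt : PySem.Int.floordiv r s < (i:Int) := by
      rw [PySem.Int.floordiv_lt_iff_lt_mul hs]
      linarith [hr.2]
    rw [List.map_eq_nil_iff, List.filter_eq_nil_iff]
    intro c hc
    rw [PySem.List.mem_pyRange_one] at hc
    rw [hpred r c hr.1 hc.1 hc.2]
    simp [ne_of_lt hdrlt]
  have hright : (PySem.List.pyRange (min (s*(i:Int)+s) R) R 1).flatMap
      (fun r => ((PySem.List.pyRange 0 C 1).filter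
        (fun c => (PySem.Int.floordiv r s * ((((C+s-1)/s).toNat : Nat) : Int) + PySem.Int.floordiv c s).toNat
                    == i * ((C+s-1)/s).toNat + j)).map (fun c => r*C+c)) = [] := by
    rw [List.flatMap_eq_nil_iff]
    intro r hr
    rw [PySem.List.mem_pyRange_one] at hr
    have hge : s*(i:Int)+s ≤ r := by
      rcases le_or_gt (s*(i:Int)+s) R with h' | h'
      · rw [min_eq_left h'] at hr; exact hr.1
      · rw [min_eq_right (le_of_lt h')] at hr; linarith [hr.1, hr.2]
    have hr0 : (0:Int) ≤ r := by linarith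
    have hdrgt : (i:Int) < PySem.Int.floordiv r s := by
      rw [show ((i:Int) < PySem.Int.floordiv r s) ↔ ((i:Int)+1 ≤ PySem.Int.floordiv r s) from Int.lt_iff_add_one_le,
          PySem.Int.le_floordiv_iff_mul_le hs]
      linarith
    rw [List.map_eq_nil_iff, List.filter_eq_nil_iff]
    intro c hc
    rw [PySem.List.mem_pyRange_one] at hc
    rw [hpred r c hr0 hc.1 hc.2]
    simp [ne_of_gt hdrgt]
  rw [hleft, hright, List.nil_append, List.append_nil]
  apply List.flatMap_congr
  intro r hr
  rw [PySem.List.mem_pyRange_one] at hr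
  have hr0 : (0:Int) ≤ r := by linarith [hr.1]
  have hdr : PySem.Int.floordiv r s = (i:Int) := by
    rw [PySem.Int.floordiv_eq_iff_of_pos hs]
    have := lt_of_lt_of_le hr.2 (min_le_left _ _)
    constructor <;> linarith [hr.1]
  rw [List.filter_congr (fun c hc => by
    rw [PySem.List.mem_pyRange_one] at hc
    rw [hpred r c hr0 hc.1 hc.2, hdr]
    simp : ∀ c ∈ PySem.List.pyRange 0 C 1,
      ((PySem.Int.floordiv r s * ((((C+s-1)/s).toNat : Nat) : Int) + PySem.Int.floordiv c s).toNat
        == i * ((C+s-1)/s).toNat + j)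
      = (fun c => decide (s*(j:Int) ≤ c ∧ c < s*(j:Int)+s)) c)]
  rw [pv_filter_pyRange 0 C (s*(j:Int)) (s*(j:Int)+s),
      max_eq_right (by positivity : (0:Int) ≤ s*(j:Int)), min_comm]

theorem pv_getD_replicate (n k : Nat) : (List.replicate n ([] : List Int)).getD k [] = [] := by
  rw [List.getD_eq_getElem?_getD, List.getElem?_replicate]
  split <;> rfl

theorem pv_main {R C s : Int} (hs : 0 < s) (hR : 0 < R) (hC : 0 < C) :
    grid_chunks R C s = grid_chunks_alt R C s := by
  have hqR : (0:Int) < (R+s-1)/s := pv_ceil_pos hs hR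
  have hqC : (0:Int) < (C+s-1)/s := pv_ceil_pos hs hC
  have hqCcast : ((((C+s-1)/s).toNat : Nat) : Int) = (C+s-1)/s := Int.toNat_of_nonneg (le_of_lt hqC)
  have hpyR : PySem.List.pyRange 0 R s = List.map (fun k : Nat => s*(k:Int)) (List.range ((R+s-1)/s).toNat) := by
    rw [PySem.List.pyRange_of_pos 0 R hs, if_pos hR]
    simp only [zero_add, sub_zero]
  have hpyC : PySem.List.pyRange 0 C s = List.map (fun k : Nat => s*(k:Int)) (List.range ((C+s-1)/s).toNat) := by
    rw [PySem.List.pyRange_of_pos 0 C hs, if_pos hC]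
    simp only [zero_add, sub_zero]
  have hlenR : (PySem.List.pyRange 0 R s).length = ((R+s-1)/s).toNat := by rw [hpyR]; simp
  have hlenC : (PySem.List.pyRange 0 C s).length = ((C+s-1)/s).toNat := by rw [hpyC]; simp
  have hguard : ¬ ((PySem.List.pyRange 0 R s).length = 0 ∨ (PySem.List.pyRange 0 C s).length = 0) := by
    rw [hlenR, hlenC]
    omega
  rw [pv_A_form, pv_B_form R C s hguard, hlenR, hlenC]
  -- bound: every cell's bucket index is in range
  have hbound : ∀ p ∈ (PySem.List.pyRange 0 R 1).flatMap
      (fun r => (PySem.List.pyRange 0 C 1).map (fun c => (r, c))),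
      (PySem.Int.floordiv p.1 s * ((((C+s-1)/s).toNat : Nat) : Int) + PySem.Int.floordiv p.2 s).toNat
        < (List.replicate (((R+s-1)/s).toNat * ((C+s-1)/s).toNat) ([] : List Int)).length := by
    intro p hp
    rw [List.length_replicate]
    simp only [List.mem_flatMap, List.mem_map] at hp
    obtain ⟨r, hr, c, hc, rfl⟩ := hp
    rw [PySem.List.mem_pyRange_one] at hr hc
    have hdr0 : 0 ≤ PySem.Int.floordiv r s := by
      rw [show (0:Int) ≤ PySem.Int.floordiv r s ↔ (0:Int)*s ≤ r from PySem.Int.le_floordiv_iff_mul_le hs]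
      linarith [hr.1]
    have hdc0 : 0 ≤ PySem.Int.floordiv c s := by
      rw [show (0:Int) ≤ PySem.Int.floordiv c s ↔ (0:Int)*s ≤ c from PySem.Int.le_floordiv_iff_mul_le hs]
      linarith [hc.1]
    have hdr : PySem.Int.floordiv r s < (R+s-1)/s := by
      rw [PySem.Int.floordiv_lt_iff_lt_mul hs]
      linarith [hr.2, pv_ceil_le (R := R) hs]
    have hdc : PySem.Int.floordiv c s < (C+s-1)/s := by
      rw [PySem.Int.floordiv_lt_iff_lt_mul hs]
      linarith [hc.2, pv_ceil_le (R := C) hs]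
    have hlt : PySem.Int.floordiv r s * ((((C+s-1)/s).toNat : Nat) : Int) + PySem.Int.floordiv c s
        < (R+s-1)/s * ((C+s-1)/s) := by
      rw [hqCcast]
      have h1 : PySem.Int.floordiv r s * ((C+s-1)/s) ≤ ((R+s-1)/s - 1) * ((C+s-1)/s) :=
        mul_le_mul_of_nonneg_right (by omega) (le_of_lt hqC)
      have h2 : ((R+s-1)/s - 1) * ((C+s-1)/s) = (R+s-1)/s * ((C+s-1)/s) - (C+s-1)/s := by ring
      linarith
    have hnn : 0 ≤ PySem.Int.floordiv r s * ((((C+s-1)/s).toNat : Nat) : Int) + PySem.Int.floordiv c s := by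
      have := mul_nonneg hdr0 (Int.natCast_nonneg ((C+s-1)/s).toNat)
      linarith
    have hcast : ((((R+s-1)/s).toNat * ((C+s-1)/s).toNat : Nat) : Int) = (R+s-1)/s * ((C+s-1)/s) := by
      push_cast [Int.toNat_of_nonneg (le_of_lt hqR), Int.toNat_of_nonneg (le_of_lt hqC)]
      ring
    dsimp only
    omega
  rw [pv_foldl_bucket _ _ _ _ hbound]
  rw [List.length_replicate]
  -- A side to a single map over range (rb*cb)
  rw [hpyR, hpyC, List.flatMap_map]
  simp only [List.map_map, Function.comp_def]
  refine Eq.trans ((pv_range_mul ((C+s-1)/s).toNat (by omega)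
      (fun i j => (PySem.List.pyRange (s*(i:Int)) (min (s*(i:Int)+s) R) 1).flatMap
        (fun r => (PySem.List.pyRange (s*(j:Int)) (min (s*(j:Int)+s) C) 1).map (fun c => r*C+c)))
      ((R+s-1)/s).toNat).symm) ?_
  apply List.map_congr_left
  intro k hk
  rw [List.mem_range] at hk
  have hcb : 0 < ((C+s-1)/s).toNat := by omega
  have hi : ((k / ((C+s-1)/s).toNat : Nat) : Int) < (R+s-1)/s := by
    have h1 : k / ((C+s-1)/s).toNat < ((R+s-1)/s).toNat := Nat.div_lt_of_lt_mul ?_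
    · omega
    · rw [Nat.mul_comm] at hk
      exact hk
  have hj : ((k % ((C+s-1)/s).toNat : Nat) : Int) < (C+s-1)/s := by
    have := Nat.mod_lt k hcb
    omega
  have hkeq : k / ((C+s-1)/s).toNat * ((C+s-1)/s).toNat + k % ((C+s-1)/s).toNat = k := by
    rw [Nat.mul_comm]
    exact Nat.div_add_mod k _
  rw [pv_getD_replicate, List.nil_append]
  have hcell := pv_cell (R := R) hs hC (k / ((C+s-1)/s).toNat) (k % ((C+s-1)/s).toNat) hi hj
  rw [hkeq] at hcell
  exact hcell.symm

theorem pv_pyRange_neg_nil {b s : Int} (hs : s < 0) (hb : 0 ≤ b) : PySem.List.pyRange 0 b s = [] := by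
  simp only [PySem.List.pyRange, if_neg (by omega : ¬ s = 0), if_neg (by omega : ¬ 0 < s),
    if_neg (by omega : ¬ b < 0)]
  simp

theorem pv_len_neg {b s : Int} (hs : s < 0) (hb : b < 0) :
    (PySem.List.pyRange 0 b s).length = ((-b + -s - 1)/(-s)).toNat := by
  simp only [PySem.List.pyRange, if_neg (by omega : ¬ s = 0), if_neg (by omega : ¬ 0 < s),
    if_pos (by omega : b < 0), zero_sub]
  simp

theorem pv_pos_nil {b s : Int} (hs : 0 < s) (hb : b ≤ 0) : PySem.List.pyRange 0 b s = [] := by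
  rw [PySem.List.pyRange_of_pos 0 b hs, if_neg (by omega : ¬ 0 < b)]
  simp

theorem pv_equal (R C s : Int) (hpre : s ≠ 0) : grid_chunks R C s = grid_chunks_alt R C s := by
  rcases lt_trichotomy s 0 with hs | hs | hs
  · rcases le_or_gt 0 R with hR | hR
    · rw [pv_A_form, pv_pyRange_neg_nil hs hR]
      simp [grid_chunks_alt, pv_pyRange_neg_nil hs hR]
    · rcases le_or_gt 0 C with hC | hC
      · rw [pv_A_form, pv_pyRange_neg_nil hs hC]
        simp [grid_chunks_alt, pv_pyRange_neg_nil hs hC]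
      · have h1 : 0 < (-R + -s - 1)/(-s) := pv_ceil_pos (by omega) (by omega)
        have h2 : 0 < (-C + -s - 1)/(-s) := pv_ceil_pos (by omega) (by omega)
        have hguard : ¬ ((PySem.List.pyRange 0 R s).length = 0 ∨ (PySem.List.pyRange 0 C s).length = 0) := by
          rw [pv_len_neg hs hR, pv_len_neg hs hC]
          omega
        rw [pv_A_form]
        simp only [grid_chunks_alt, if_neg hguard]
        rw [PySem.List.pyRange_one_eq_nil (le_of_lt hR), List.foldl_nil]
        calc (PySem.List.pyRange 0 R s).flatMap (fun rs =>
              (PySem.List.pyRange 0 C s).map (fun cs =>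
                (PySem.List.pyRange rs (min (rs+s) R) 1).flatMap (fun r =>
                  (PySem.List.pyRange cs (min (cs+s) C) 1).map (fun c => r*C+c))))
            = (PySem.List.pyRange 0 R s).flatMap (fun _ =>
                List.replicate (PySem.List.pyRange 0 C s).length ([] : List Int)) := by
              apply List.flatMap_congr
              intro rs _
              rw [← List.map_const']
              apply List.map_congr_left
              intro cs _
              rw [PySem.List.pyRange_one_eq_nil
                (show min (rs+s) R ≤ rs from le_trans (min_le_left _ _) (by linarith))]
              rfl
          _ = List.replicate ((PySem.List.pyRange 0 R s).length * (PySem.List.pyRange 0 C s).length)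
                ([] : List Int) := pv_flatMap_const _ _ _
  · exact absurd hs hpre
  · rcases le_or_gt R 0 with hR | hR
    · rw [pv_A_form, pv_pos_nil hs hR]
      simp [grid_chunks_alt, pv_pos_nil hs hR]
    · rcases le_or_gt C 0 with hC | hC
      · rw [pv_A_form, pv_pos_nil hs hC]
        simp [grid_chunks_alt, pv_pos_nil hs hC]
      · exact pv_main hs hR hC

-- ===== VERDICT (by name: the statement is the Claim_ definition above) =====
theorem grid_chunks_spec : Claim_equal_grid_chunks := by
  intro num_rows num_cols chunk_size _ hpre
  exact pv_equal num_rows num_cols chunk_size hpre
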